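-- pv_equiv track=rewrite | github.com/kevintomsgithub/leetcode | palindrom_substring.py | count_palindrome_from_center
-- ===== SOURCE A (Python) =====
-- def count_palindrome_from_center(s, i, j):
--     result = 0
--
--     while i>=0 and j<len(s):
--         if s[i] != s[j]:
--             break
--         i -= 1
--         j += 1
--         result += 1
--
--     return result
-- ===== SOURCE B (Python) =====
-- def count_palindrome_from_center(s, i, j):
--     # Count matching symmetric pairs as the common prefix of the reversed
--     # left part s[:i+1] and the right part s[j:].
--     if i < 0 or j < 0:
--         return 0
--     left = s[:i + 1][::-1]
--     right = s[j:]
--     k = 0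
--     for a, b in zip(left, right):
--         if a != b:
--             break
--         k += 1
--     return k
-- ===== Notes on version B (the rewrite author's own statement) =====
-- stated objective: simpler
-- what changed: B replaces A's index-arithmetic while loop over (i,j) with slicing: it reverses the left part s[:i+1], takes the right part s[j:], and counts the common prefix of the two by a single zip scan, guarding invalid (negative) centres with an explicit early return of 0.
-- intended difference: On inputs with 0 <= i < len(s) and -len(s) <= j < 0 where s[i] == s[j], A silently counts pairs via Python's negative-index wraparound and returns a positive count, while B returns 0; a centre index j < 0 is not a valid expansion centre, so B's 0 is the intended value. — e.g. on count_palindrome_from_center("aa", 0, -1): A returns 1, B returns 0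
import Mathlib
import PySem

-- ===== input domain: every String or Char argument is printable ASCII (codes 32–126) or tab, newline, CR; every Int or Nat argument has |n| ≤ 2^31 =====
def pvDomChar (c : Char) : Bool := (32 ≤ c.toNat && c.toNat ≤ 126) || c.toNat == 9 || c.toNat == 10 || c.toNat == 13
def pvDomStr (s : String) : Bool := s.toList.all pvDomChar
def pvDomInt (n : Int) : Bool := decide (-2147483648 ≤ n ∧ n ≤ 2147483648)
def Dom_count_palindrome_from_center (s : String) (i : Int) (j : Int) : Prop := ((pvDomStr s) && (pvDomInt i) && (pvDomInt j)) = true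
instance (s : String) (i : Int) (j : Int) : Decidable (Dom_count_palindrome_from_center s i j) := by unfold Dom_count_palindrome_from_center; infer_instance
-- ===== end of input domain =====

-- B computes the answer as the common-prefix length of the reversed left slice and the right
-- slice (simpler decomposition, not faster); A's negative-j wraparound values are declared in D_.


-- ===== PORT A =====
-- A's while loop; fuel (i+1).toNat dominates the iteration count (i decreases by 1 each turn
-- and the loop requires 0 ≤ i), so the fuel recursion computes exactly A's loop.
-- pyGet? = none is Python's IndexError; the loop result is then unclaimed (outside Pre_).
def cpfc_loop (l : List Char) (fuel : Nat) (i j result : Int) : Int :=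
  match fuel with
  | 0 => result
  | f + 1 =>
    if 0 ≤ i ∧ j < (l.length : Int) then
      match PySem.List.pyGet? l i, PySem.List.pyGet? l j with
      | some a, some b => if a ≠ b then result else cpfc_loop l f (i - 1) (j + 1) (result + 1)
      | _, _ => result
    else result

def count_palindrome_from_center (s : String) (i : Int) (j : Int) : Int :=
  cpfc_loop s.toList (i + 1).toNat i j 0

-- ===== PORT B =====
-- count of leading equal pairs of zip(left, right), with break at the first mismatch
def cpfc_scan : List (Char × Char) → Int → Int
  | [], k => k
  | (a, b) :: t, k => if a ≠ b then k else cpfc_scan t (k + 1)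

def count_palindrome_from_center_alt (s : String) (i : Int) (j : Int) : Int :=
  if i < 0 ∨ j < 0 then 0
  else
    -- left = s[:i+1][::-1] (slice then reverse, per PySem.List.slice?_none_none_neg_one); right = s[j:]
    cpfc_scan (((PySem.List.slice s.toList none (some (i + 1))).reverse).zip
      (PySem.List.slice s.toList (some j) none)) 0

-- ===== PRECONDITION & SPEC =====
-- Pre_ excludes exactly the inputs where A raises IndexError: loop entry with 0 ≤ i,
-- j < len(s) but i ≥ len(s) or j < -len(s), where s[i] or s[j] is out of range.
def Pre_count_palindrome_from_center (s : String) (i : Int) (j : Int) : Prop :=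
  ¬ (0 ≤ i ∧ j < PySem.Str.len s ∧ (PySem.Str.len s ≤ i ∨ j < -PySem.Str.len s))
instance (s : String) (i : Int) (j : Int) : Decidable (Pre_count_palindrome_from_center s i j) := by unfold Pre_count_palindrome_from_center; infer_instance

def pvWitness_count_palindrome_from_center : String × Int × Int := ("aba", 1, 1)

-- On inputs with 0 ≤ i < len(s) and -len(s) ≤ j < 0 where s[i] == s[j], A counts pairs through
-- Python's negative-index wraparound and returns a positive count, while B returns 0; a negative
-- centre j is not a valid expansion centre, so B's 0 is the intended value.
def D_count_palindrome_from_center (s : String) (i : Int) (j : Int) : Prop :=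
  0 ≤ i ∧ i < PySem.Str.len s ∧ -PySem.Str.len s ≤ j ∧ j < 0 ∧
    s.toList[i.toNat]? = s.toList[(j + PySem.Str.len s).toNat]?
instance (s : String) (i : Int) (j : Int) : Decidable (D_count_palindrome_from_center s i j) := by unfold D_count_palindrome_from_center; infer_instance

def Spec_count_palindrome_from_center (s : String) (i : Int) (j : Int) (out : Int) : Prop := ¬ D_count_palindrome_from_center s i j → out = count_palindrome_from_center_alt s i j
instance (s : String) (i : Int) (j : Int) (out : Int) : Decidable (Spec_count_palindrome_from_center s i j out) := by unfold Spec_count_palindrome_from_center; infer_instance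

def pvDiffWitness_count_palindrome_from_center : String × Int × Int := ("aa", 0, -1)
def pvDiffWitnessOut_count_palindrome_from_center : Int × Int := (1, 0)

-- ===== CLAIM (what is proved, stated in full; the proofs are below) =====
def Claim_unchanged_count_palindrome_from_center : Prop := ∀ (s : String) (i : Int) (j : Int), Dom_count_palindrome_from_center s i j → Pre_count_palindrome_from_center s i j → Spec_count_palindrome_from_center s i j (count_palindrome_from_center s i j)
def Claim_changed_count_palindrome_from_center : Prop := Dom_count_palindrome_from_center (pvDiffWitness_count_palindrome_from_center.1) (pvDiffWitness_count_palindrome_from_center.2.1) (pvDiffWitness_count_palindrome_from_center.2.2) ∧ Pre_count_palindrome_from_center (pvDiffWitness_count_palindrome_from_center.1) (pvDiffWitness_count_palindrome_from_center.2.1) (pvDiffWitness_count_palindrome_from_center.2.2) ∧ D_count_palindrome_from_center (pvDiffWitness_count_palindrome_from_center.1) (pvDiffWitness_count_palindrome_from_center.2.1) (pvDiffWitness_count_palindrome_from_center.2.2) ∧ count_palindrome_from_center (pvDiffWitness_count_palindrome_from_center.1) (pvDiffWitness_count_palindrome_from_center.2.1) (pvDiffWitness_count_palindrome_from_center.2.2)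 = pvDiffWitnessOut_count_palindrome_from_center.1 ∧ count_palindrome_from_center_alt (pvDiffWitness_count_palindrome_from_center.1) (pvDiffWitness_count_palindrome_from_center.2.1) (pvDiffWitness_count_palindrome_from_center.2.2) = pvDiffWitnessOut_count_palindrome_from_center.2 ∧ pvDiffWitnessOut_count_palindrome_from_center.1 ≠ pvDiffWitnessOut_count_palindrome_from_center.2
def Claim_exact_count_palindrome_from_center : Prop := ∀ (s : String) (i : Int) (j : Int), Dom_count_palindrome_from_center s i j → Pre_count_palindrome_from_center s i j → D_count_palindrome_from_center s i j → count_palindrome_from_center s i j ≠ count_palindrome_from_center_alt s i j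

-- ===== LEMMAS AND PROOFS =====

-- Python's s[j] for -len ≤ j < 0 reads index j + len.
lemma pyGet?_neg_add (l : List Char) (j : Int) (h1 : -(l.length : Int) ≤ j) (h2 : j < 0) :
    PySem.List.pyGet? l j = l[(j + (l.length : Int)).toNat]? := by
  have hk : j = -(((-j).toNat : Nat) : Int) := by omega
  rw [hk, PySem.List.pyGet?_neg_natCast l (-j).toNat (by omega) (by omega)]
  congr 1
  omega

-- the loop result never drops below the accumulator
lemma loop_ge (l : List Char) : ∀ (m : Nat) (i j r : Int), r ≤ cpfc_loop l m i j r := by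
  intro m
  induction m with
  | zero => intro i j r; simp [cpfc_loop]
  | succ m ih =>
    intro i j r
    simp only [cpfc_loop]
    split_ifs with h
    · rcases hA : PySem.List.pyGet? l i with _ | a <;>
        rcases hB : PySem.List.pyGet? l j with _ | b <;>
        simp only
      all_goals try exact le_refl r
      split_ifs with hab
      · exact le_refl r
      · calc r ≤ r + 1 := by omega
          _ ≤ _ := ih (i - 1) (j + 1) (r + 1)
    · exact le_refl r

-- A's loop, entered at i = m - 1 with fuel m, equals B's zip scan.
lemma loop_eq_scan (l : List Char) (m : Nat) :
    ∀ (j r : Int), 0 ≤ j → (m ≤ l.length ∨ (l.length : Int) ≤ j) →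
      cpfc_loop l m ((m : Int) - 1) j r
        = cpfc_scan (((l.take m).reverse).zip (l.drop j.toNat)) r := by
  induction m with
  | zero => intro j r hj _; simp [cpfc_loop, cpfc_scan]
  | succ m ih =>
    intro j r hj hm
    have hi : ((m + 1 : Nat) : Int) - 1 = (m : Int) := by push_cast; ring
    rw [hi]
    simp only [cpfc_loop]
    by_cases hjl : j < (l.length : Int)
    · have hml : m < l.length := by rcases hm with h | h; omega; omega
      have hjn : j.toNat < l.length := by omega
      rw [if_pos ⟨by exact_mod_cast Nat.zero_le m, hjl⟩]
      have hgA : PySem.List.pyGet? l (m : Int) = some l[m] := by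
        rw [PySem.List.pyGet?_natCast l m, List.getElem?_eq_getElem hml]
      have hgB : PySem.List.pyGet? l j = some l[j.toNat] := by
        rw [PySem.List.pyGet?_of_nonneg l hj, List.getElem?_eq_getElem hjn]
      rw [List.take_succ, List.getElem?_eq_getElem hml,
        List.drop_eq_getElem_cons hjn]
      simp only [hgA, hgB, Option.toList_some, List.reverse_append, List.reverse_cons,
        List.reverse_nil, List.nil_append, List.cons_append, List.zip_cons_cons, cpfc_scan]
      split_ifs with hab
      · rfl
      · have hj1 : (j + 1).toNat = j.toNat + 1 := by omega
        rw [ih (j + 1) (r + 1) (by omega) (Or.inl (by omega)), hj1]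
    · rw [if_neg (fun h => hjl h.2)]
      rw [List.drop_eq_nil_of_le (by omega : l.length ≤ j.toNat)]
      simp [cpfc_scan]

-- ===== VERDICT (by name: the statement is the Claim_ definition above) =====
theorem count_palindrome_from_center_spec : Claim_unchanged_count_palindrome_from_center := by
  intro s i j _ hpre hnd
  have hlen : PySem.Str.len s = (s.toList.length : Int) := by simp [pysem]
  rw [Pre_count_palindrome_from_center, hlen] at hpre
  rw [D_count_palindrome_from_center, hlen] at hnd
  by_cases hi : i < 0
  · have h0 : (i + 1).toNat = 0 := by omega
    simp [count_palindrome_from_center, count_palindrome_from_center_alt, h0, cpfc_loop, hi]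
  · push_neg at hi
    by_cases hj : j < 0
    · have hjlen : j < (s.toList.length : Int) := by omega
      have hil : i < (s.toList.length : Int) := by
        by_contra h; exact hpre ⟨hi, hjlen, Or.inl (by omega)⟩
      have hjl : -(s.toList.length : Int) ≤ j := by
        by_contra h; exact hpre ⟨hi, hjlen, Or.inr (by omega)⟩
      have hne : s.toList[i.toNat]? ≠ s.toList[(j + (s.toList.length : Int)).toNat]? :=
        fun he => hnd ⟨hi, hil, hjl, hj, he⟩
      have hfuel : (i + 1).toNat = i.toNat + 1 := by omega
      have h1 : i.toNat < s.toList.length := by omega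
      have h2 : (j + (s.toList.length : Int)).toNat < s.toList.length := by omega
      have hchars : s.toList[i.toNat] ≠ s.toList[(j + (s.toList.length : Int)).toNat] := by
        intro h
        exact hne (by rw [List.getElem?_eq_getElem h1, List.getElem?_eq_getElem h2, h])
      have hgA : PySem.List.pyGet? s.toList i = some s.toList[i.toNat] := by
        rw [PySem.List.pyGet?_of_nonneg s.toList hi, List.getElem?_eq_getElem h1]
      have hgB : PySem.List.pyGet? s.toList j
          = some s.toList[(j + (s.toList.length : Int)).toNat] := by
        rw [pyGet?_neg_add s.toList j hjl hj, List.getElem?_eq_getElem h2]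
      have hA : count_palindrome_from_center s i j = 0 := by
        rw [count_palindrome_from_center, hfuel]
        simp only [cpfc_loop]
        rw [if_pos ⟨hi, hjlen⟩]
        simp only [hgA, hgB]
        rw [if_pos hchars]
      rw [hA, count_palindrome_from_center_alt, if_pos (Or.inr hj)]
    · push_neg at hj
      rw [count_palindrome_from_center_alt, if_neg (by omega : ¬(i < 0 ∨ j < 0))]
      rw [PySem.List.slice_to s.toList (by omega : (0 : Int) ≤ i + 1),
        PySem.List.slice_from s.toList hj]
      rw [count_palindrome_from_center]
      set m := (i + 1).toNat with hmdef
      have him : i = (m : Int) - 1 := by omega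
      rw [him]
      apply loop_eq_scan s.toList m j 0 hj
      by_cases hjl : j < (s.toList.length : Int)
      · left
        have hil : i < (s.toList.length : Int) := by
          by_contra h; exact hpre ⟨hi, hjl, Or.inl (by omega)⟩
        omega
      · right; omega

theorem count_palindrome_from_center_changed : Claim_changed_count_palindrome_from_center := by
  unfold Claim_changed_count_palindrome_from_center; decide

theorem count_palindrome_from_center_tight : Claim_exact_count_palindrome_from_center := by
  intro s i j _ hpre hD
  have hlen : PySem.Str.len s = (s.toList.length : Int) := by simp [pysem]
  rw [Pre_count_palindrome_from_center, hlen] at hpre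
  rw [D_count_palindrome_from_center, hlen] at hD
  obtain ⟨hi, hil, hjl, hj, heq⟩ := hD
  have hB : count_palindrome_from_center_alt s i j = 0 := by
    rw [count_palindrome_from_center_alt, if_pos (Or.inr hj)]
  have hjlen : j < (s.toList.length : Int) := by omega
  have hfuel : (i + 1).toNat = i.toNat + 1 := by omega
  have h1 : i.toNat < s.toList.length := by omega
  have h2 : (j + (s.toList.length : Int)).toNat < s.toList.length := by omega
  have hchars : s.toList[i.toNat] = s.toList[(j + (s.toList.length : Int)).toNat] := by
    rw [List.getElem?_eq_getElem h1, List.getElem?_eq_getElem h2] at heq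
    exact Option.some.inj heq
  have hgA : PySem.List.pyGet? s.toList i = some s.toList[i.toNat] := by
    rw [PySem.List.pyGet?_of_nonneg s.toList hi, List.getElem?_eq_getElem h1]
  have hgB : PySem.List.pyGet? s.toList j
      = some s.toList[(j + (s.toList.length : Int)).toNat] := by
    rw [pyGet?_neg_add s.toList j hjl hj, List.getElem?_eq_getElem h2]
  have hA : 1 ≤ count_palindrome_from_center s i j := by
    rw [count_palindrome_from_center, hfuel]
    simp only [cpfc_loop]
    rw [if_pos ⟨hi, hjlen⟩]
    simp only [hgA, hgB, hchars, ne_eq, not_true_eq_false, if_false]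
    exact loop_ge s.toList i.toNat (i - 1) (j + 1) (0 + 1)
  rw [hB]
  omega
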